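-- pv_equiv track=rewrite | github.com/Zeyd-dev/Basic-Calculator | Calculatrice (+ et -).py | pos1
-- ===== SOURCE A (Python) =====
-- list=["+","-"]
--
-- def pos1(ch):
--     s=0
--     p=0
--     for i in range(len(ch)):
--         if ch[i] in list:
--             s=s+1
--             if s==2:
--                 p=i
--     return p
-- ===== SOURCE B (Python) =====
-- def pos1(ch):
--     first = -1
--     for i in range(len(ch)):
--         if ch[i] in ("+", "-"):
--             first = i
--             break
--     if first == -1:
--         return 0
--     for j in range(first + 1, len(ch)):
--         if ch[j] in ("+", "-"):
--             return j
--     return 0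
-- ===== Notes on version B (the rewrite author's own statement) =====
-- stated objective: alternative
-- what changed: Replaces A's counter-driven single pass over the whole string with an explicit locate-first-operator then locate-next-operator decomposition, each scan breaking as soon as it finds its operator.
import Mathlib
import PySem

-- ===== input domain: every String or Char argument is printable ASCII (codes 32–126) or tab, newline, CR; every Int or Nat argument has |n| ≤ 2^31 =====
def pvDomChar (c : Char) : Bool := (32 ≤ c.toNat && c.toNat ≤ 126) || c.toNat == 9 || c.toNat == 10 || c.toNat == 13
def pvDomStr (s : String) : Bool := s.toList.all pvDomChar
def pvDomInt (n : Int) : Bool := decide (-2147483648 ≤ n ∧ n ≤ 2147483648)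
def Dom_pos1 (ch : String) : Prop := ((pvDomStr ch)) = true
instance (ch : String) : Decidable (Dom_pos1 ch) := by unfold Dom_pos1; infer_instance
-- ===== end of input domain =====

-- B replaces A's counter-driven single pass with a find-first / find-next two-scan decomposition (objective: alternative).

-- ===== PORT A =====
-- A's for-loop over range(len(ch)) with counter s and result p, as structural recursion over the chars with their index.
def pos1Loop : List Char → Nat → Nat → Int → Int
  | [], _, _, p => p
  | c :: rest, i, s, p =>
    if c = '+' ∨ c = '-' then
      pos1Loop rest (i + 1) (s + 1) (if s + 1 = 2 then (i : Int) else p)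
    else
      pos1Loop rest (i + 1) s p

def pos1 (ch : String) : Int := pos1Loop ch.toList 0 0 0

-- ===== PORT B =====
-- B's first loop: scan for the first operator from index i, break (return its index) when found.
def findOp : List Char → Nat → Option Nat
  | [], _ => none
  | c :: rest, i => if c = '+' ∨ c = '-' then some i else findOp rest (i + 1)

def pos1_alt (ch : String) : Int :=
  match findOp ch.toList 0 with
  | none => 0
  | some first =>
    -- B's second loop: scan the remainder (indices first+1 …) for the next operator
    match findOp (ch.toList.drop (first + 1)) (first + 1) with
    | none => 0
    | some j => (j : Int)

-- ===== PRECONDITION & SPEC =====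
def Spec_pos1 (ch : String) (out : Int) : Prop := out = pos1_alt ch
instance (ch : String) (out : Int) : Decidable (Spec_pos1 ch out) := by unfold Spec_pos1; infer_instance

-- ===== CLAIM (what is proved, stated in full; the proofs are below) =====
def Claim_equal_pos1 : Prop := ∀ (ch : String), Dom_pos1 ch → Spec_pos1 ch (pos1 ch)

-- ===== LEMMAS AND PROOFS =====

theorem findOp_ge (l : List Char) (i j : Nat) (h : findOp l i = some j) : i ≤ j := by
  induction l generalizing i with
  | nil => simp [findOp] at h
  | cons c rest ih =>
    simp only [findOp] at h
    split at h
    · simp only [Option.some.injEq] at h; omega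
    · have := ih (i + 1) h; omega

-- A's loop after the second operator has been found: p is final.
theorem loop_ge_two (l : List Char) (i s : Nat) (p : Int) (hs : 2 ≤ s) :
    pos1Loop l i s p = p := by
  induction l generalizing i s with
  | nil => rfl
  | cons c rest ih =>
    simp only [pos1Loop]
    split
    · rw [if_neg (by omega)]; exact ih _ _ (by omega)
    · exact ih _ _ hs

-- A's loop after one operator: it returns the index of the next operator, else p.
theorem loop_one (l : List Char) (i : Nat) (p : Int) :
    pos1Loop l i 1 p = match findOp l i with | none => p | some j => (j : Int) := by
  induction l generalizing i with
  | nil => rfl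
  | cons c rest ih =>
    simp only [pos1Loop, findOp]
    split
    · exact loop_ge_two rest (i + 1) 2 i (by omega)
    · exact ih (i + 1)

-- A's loop from scratch equals B's two-scan decomposition.
theorem loop_zero (l : List Char) (i : Nat) (p : Int) :
    pos1Loop l i 0 p =
      match findOp l i with
      | none => p
      | some first =>
        match findOp (l.drop (first + 1 - i)) (first + 1) with
        | none => p
        | some j => (j : Int) := by
  induction l generalizing i with
  | nil => rfl
  | cons c rest ih =>
    simp only [pos1Loop, findOp]
    split
    · simp only [if_neg (by omega : ¬ (0 : Nat) + 1 = 2)]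
      rw [loop_one rest (i + 1) p]
      have : i + 1 - i = 1 := by omega
      simp [this]
    · rw [ih (i + 1)]
      cases hf : findOp rest (i + 1) with
      | none => simp
      | some first =>
        have hge : i + 1 ≤ first := findOp_ge _ _ _ hf
        have hdrop : (c :: rest).drop (first + 1 - i) = rest.drop (first + 1 - (i + 1)) := by
          have h1 : first + 1 - i = (first + 1 - (i + 1)) + 1 := by omega
          simp [h1]
        simp [hdrop]

-- ===== VERDICT (by name: the statement is the Claim_ definition above) =====
theorem pos1_spec : Claim_equal_pos1 := by
  intro ch _
  unfold Spec_pos1 pos1 pos1_alt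
  rw [loop_zero ch.toList 0 0]
  cases hf : findOp ch.toList 0 <;> simp
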